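-- pv_equiv track=rewrite | github.com/shir101/PythonProject | main_DataBaseBuild_26.3.23.py | database2_build
-- ===== SOURCE A (Python) =====
-- def database2_build(database2_built,
--                     dif_threshold):  # dif_threshold - הסף שצריך לעבור בשביל לומר שהקיימר מייצג את המשפחה, מה שעובר אותו אז צריך להסיר כי גנרי מדי
--     # database2 is the collection of sets we get from Build function below
--     # what we want to receive in the function in order to work on in this function -
--     # either raw fasta files of lineages and we will arrange them an find representatives -
--     # receive from Build function the processed one
--     # find representative kmers
--     to_remove = set()
--     count = 0
--     for family in database2_built:
--         for kmer in database2_built[family]: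
--             for index in database2_built:
--                 if ((database2_built[index] != database2_built[family]) and (kmer in database2_built[index])):
--                     count = count + 1
--             if (count >= dif_threshold):  # if bigger than threshold than too generic and not representing
--                 to_remove.add(kmer)
--             count = 0
--     # removing the generic kmers
--     for index2 in database2_built:
--         for removed in to_remove:
--             temp = database2_built[index2]
--             temp.discard(removed)
--             database2_built[index2] = temp
--     return database2_built
-- ===== SOURCE B (Python) =====
-- def database2_build(database2_built, dif_threshold):
--     # One pass of counting instead of the triple loop: a kmer in family F is kept
--     # iff (#families containing it) - (#families whose set equals F's) < dif_threshold.
--     # Return-value equivalence: A discards from the existing set objects in place,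
--     # B rebinds each key to a fresh set.
--     eqcount = {}
--     for s in database2_built.values():
--         key = tuple(sorted(s))
--         eqcount[key] = eqcount.get(key, 0) + 1
--     total = {}
--     for s in database2_built.values():
--         for kmer in s:
--             total[kmer] = total.get(kmer, 0) + 1
--     to_remove = set()
--     for s in database2_built.values():
--         eq = eqcount[tuple(sorted(s))]
--         for kmer in s:
--             if total[kmer] - eq >= dif_threshold:
--                 to_remove.add(kmer)
--     for fam in database2_built:
--         database2_built[fam] = database2_built[fam] - to_remove
--     return database2_built
-- ===== Notes on version B (the rewrite author's own statement) =====
-- stated objective: faster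
-- what changed: Replaces A's triple nested scan (for every kmer of every family, rescan all families and compare whole sets) by one counting pass: a per-kmer family-count dict and a count of families per identical set (keyed by the sorted set); a kmer is removed iff total[kmer] - eqcount[its family's set] reaches the threshold.
import Mathlib
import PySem

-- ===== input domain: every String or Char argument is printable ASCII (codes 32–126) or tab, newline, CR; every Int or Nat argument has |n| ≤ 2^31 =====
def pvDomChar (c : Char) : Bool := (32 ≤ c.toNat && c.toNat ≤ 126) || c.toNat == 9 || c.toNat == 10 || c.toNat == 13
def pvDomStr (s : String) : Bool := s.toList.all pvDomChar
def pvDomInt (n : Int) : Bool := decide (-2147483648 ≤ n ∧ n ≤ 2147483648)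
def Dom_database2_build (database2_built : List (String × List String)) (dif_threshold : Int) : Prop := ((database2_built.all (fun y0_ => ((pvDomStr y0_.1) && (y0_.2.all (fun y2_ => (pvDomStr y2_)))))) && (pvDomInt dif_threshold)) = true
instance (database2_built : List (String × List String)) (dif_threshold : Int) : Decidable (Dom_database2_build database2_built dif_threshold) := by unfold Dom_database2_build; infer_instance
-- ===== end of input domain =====

-- B replaces A's cubic scan (for every kmer of every family, rescan all families) by
-- one pass of counting: per-kmer family counts and counts of equal sets (grouped by their
-- sorted element list); a kmer is too generic iff total[kmer] - eqcount[family set] ≥ threshold.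
-- A mutates the dict's set objects in place, B rebinds each key: the equivalence proved is
-- about the RETURN value.

-- shared input decoding: the dict[str, set[str]] argument the Python functions receive,
-- built from the association list (first binding wins, value lists deduplicated as sets)
def pvDictOf (l : List (String × List String)) : PySem.Dict String (List String) :=
  l.foldl (fun d p => d.setdefault p.1 (PySem.Set.ofList p.2)) PySem.Dict.empty

-- ===== PORT A =====
def database2_build (database2_built : List (String × List String)) (dif_threshold : Int) : List (String × List String) :=
  let items := (pvDictOf database2_built).items
  -- to_remove = set(); for family: for kmer in d[family]: count over index; add if count >= threshold
  let to_remove : PySem.Set String := items.foldl (fun tr fam =>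
    fam.2.foldl (fun tr kmer =>
      let count := items.foldl (fun c idx =>
        if (!(PySem.Set.equal idx.2 fam.2) && PySem.Set.contains idx.2 kmer) then c + 1 else c) (0 : Int)
      if dif_threshold ≤ count then PySem.Set.add tr kmer else tr) tr) PySem.Set.empty
  -- for index2: for removed in to_remove: discard (discard-fold order does not matter)
  items.map (fun p => (p.1, to_remove.foldl (fun s r => PySem.Set.discard s r) p.2))

-- ===== PORT B =====
def database2_build_alt (database2_built : List (String × List String)) (dif_threshold : Int) : List (String × List String) :=
  let items := (pvDictOf database2_built).items
  -- eqcount[tuple(sorted(s))] += 1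
  let eqcount : PySem.Dict (List String) Int := items.foldl (fun e s =>
    let key := PySem.List.sorted s.2 (fun x => x) false
    e.insert key (e.getD key 0 + 1)) PySem.Dict.empty
  -- total[kmer] += 1
  let total : PySem.Dict String Int := items.foldl (fun t s =>
    s.2.foldl (fun t kmer => t.insert kmer (t.getD kmer 0 + 1)) t) PySem.Dict.empty
  -- to_remove = {kmer | total[kmer] - eqcount[key(s)] >= threshold}
  let to_remove : PySem.Set String := items.foldl (fun tr s =>
    let eq := eqcount.getD (PySem.List.sorted s.2 (fun x => x) false) 0
    s.2.foldl (fun tr kmer =>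
      if dif_threshold ≤ total.getD kmer 0 - eq then PySem.Set.add tr kmer else tr) tr) PySem.Set.empty
  items.map (fun p => (p.1, PySem.Set.diff p.2 to_remove))

-- ===== PRECONDITION & SPEC =====
def Spec_database2_build (database2_built : List (String × List String)) (dif_threshold : Int) (out : List (String × List String)) : Prop := out = database2_build_alt database2_built dif_threshold
instance (database2_built : List (String × List String)) (dif_threshold : Int) (out : List (String × List String)) : Decidable (Spec_database2_build database2_built dif_threshold out) := by unfold Spec_database2_build; infer_instance

-- ===== CLAIM (what is proved, stated in full; the proofs are below) =====
def Claim_equal_database2_build : Prop := ∀ (database2_built : List (String × List String)) (dif_threshold : Int), Dom_database2_build database2_built dif_threshold → Spec_database2_build database2_built dif_threshold (database2_build database2_built dif_threshold)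

-- ===== LEMMAS AND PROOFS =====

-- every value of the decoded dict is a deduplicated set, hence Nodup
theorem pvDictOf_values_nodup (db : List (String × List String)) :
    ∀ p ∈ (pvDictOf db).items, p.2.Nodup := by
  suffices h : ∀ (db : List (String × List String)) (d : PySem.Dict String (List String)),
      (∀ q ∈ d.items, q.2.Nodup) →
      ∀ p ∈ (db.foldl (fun d p => d.setdefault p.1 (PySem.Set.ofList p.2)) d).items, p.2.Nodup by
    exact h db PySem.Dict.empty (by intro q hq; simp [PySem.Dict.empty] at hq)
  intro db
  induction db with
  | nil => intro d hd; simpa using hd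
  | cons x t ih =>
    intro d hd
    simp only [List.foldl_cons]
    apply ih
    intro q hq
    by_cases hc : d.contains x.1
    · rw [PySem.Dict.setdefault_of_contains _ _ hc] at hq; exact hd q hq
    · rw [PySem.Dict.setdefault_of_not_contains _ _ (by simpa using hc)] at hq
      rcases (PySem.Dict.mem_items_insert _ _ _ _).mp hq with h | ⟨h, _⟩
      · subst h; exact PySem.Set.nodup_ofList _
      · exact hd q h

-- a fold of discards is the set difference
theorem foldl_discard_eq_diff (rs : List String) :
    ∀ s : List String, rs.foldl (fun s r => PySem.Set.discard s r) s = PySem.Set.diff s rs := by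
  induction rs with
  | nil =>
    intro s
    simp [PySem.Set.diff]
  | cons r t ih =>
    intro s
    rw [List.foldl_cons, ih]
    simp only [PySem.Set.diff, PySem.Set.discard, List.filter_filter]
    apply List.filter_congr
    intro y _
    by_cases h2 : y = r
    · subst h2; simp
    · have h2' : ¬ r = y := fun hh => h2 hh.symm
      by_cases h1 : y ∈ t <;> simp [h1, h2]

-- value of the total counter: sum of per-family multiplicities
theorem total_getD (items : List (String × List String)) (v : String) :
    ∀ d : PySem.Dict String Int,
      (items.foldl (fun t s => s.2.foldl (fun t k => t.insert k (t.getD k 0 + 1)) t) d).getD v 0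
        = d.getD v 0 + ((items.map (fun p => (p.2.count v : Int))).sum) := by
  induction items with
  | nil => intro d; simp
  | cons p t ih =>
    intro d
    simp only [List.foldl_cons, List.map_cons, List.sum_cons, ih,
      PySem.Dict.getD_foldl_insert_add_one]
    ring

-- value of the eqcount counter: number of families with that sorted set
theorem eqcount_getD (items : List (String × List String)) (v : List String) :
    ∀ d : PySem.Dict (List String) Int,
      (items.foldl (fun e s =>
          e.insert (PySem.List.sorted s.2 (fun x => x) false)
            (e.getD (PySem.List.sorted s.2 (fun x => x) false) 0 + 1)) d).getD v 0
        = d.getD v 0 + ((items.map (fun p => PySem.List.sorted p.2 (fun x => x) false)).count v : Int) := by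
  induction items with
  | nil => intro d; simp
  | cons p t ih =>
    intro d
    simp only [List.foldl_cons, List.map_cons, ih, PySem.Dict.getD_insert, List.count_cons]
    by_cases h : v = PySem.List.sorted p.2 (fun x => x) false
    · simp [h]
      omega
    · simp [h]
      exact fun hh => h hh.symm

-- the heart: counting identity — unequal-set families containing kmer, plus same-set
-- families, equals all families containing kmer (kmer ∈ S makes same-set imply containing)
theorem count_split (S : List String) (kmer : String) (hS : S.Nodup) (hk : kmer ∈ S) :
    ∀ items : List (String × List String), (∀ p ∈ items, p.2.Nodup) →
      (items.countP (fun p => !(PySem.Set.equal p.2 S) && PySem.Set.contains p.2 kmer))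
        + ((items.map (fun p => PySem.List.sorted p.2 (fun x => x) false)).count
             (PySem.List.sorted S (fun x => x) false))
        = (items.map (fun p => p.2.count kmer)).sum := by
  intro items
  induction items with
  | nil => intro _; simp
  | cons p t ih =>
    intro hNod
    have hp : p.2.Nodup := hNod p (by simp)
    have ht := ih (fun q hq => hNod q (List.mem_cons_of_mem _ hq))
    simp only [List.countP_cons, List.map_cons, List.sum_cons, List.count_cons]
    by_cases he : PySem.Set.equal p.2 S = true
    · have hmem := (PySem.Set.equal_iff _ _).mp he
      have hmemk : kmer ∈ p.2 := (hmem kmer).mpr hk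
      have hperm : p.2.Perm S := (List.perm_ext_iff_of_nodup hp hS).mpr hmem
      have hsort : PySem.List.sorted p.2 (fun x => x) false = PySem.List.sorted S (fun x => x) false :=
        (PySem.List.sorted_id_eq_sorted_id_iff_perm _ _).mpr hperm
      have hcnt : p.2.count kmer = 1 := List.count_eq_one_of_mem hp hmemk
      have hfp : (!PySem.Set.equal p.2 S && PySem.Set.contains p.2 kmer) = false := by simp [he]
      have hbeq : ((PySem.List.sorted p.2 (fun x => x) false) == (PySem.List.sorted S (fun x => x) false)) = true := by
        simp [hsort]
      rw [hfp, hbeq, hcnt]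
      simp only [if_false, if_true, Bool.false_eq_true]
      omega
    · have hsort : ¬ ((PySem.List.sorted p.2 (fun x => x) false) = PySem.List.sorted S (fun x => x) false) := by
        intro h
        have hperm : p.2.Perm S := (PySem.List.sorted_id_eq_sorted_id_iff_perm _ _).mp h
        exact he ((PySem.Set.equal_iff _ _).mpr (fun x => hperm.mem_iff))
      have hbeq : ((PySem.List.sorted p.2 (fun x => x) false) == (PySem.List.sorted S (fun x => x) false)) = false := by
        simp [hsort]
      have hfp : (!PySem.Set.equal p.2 S && PySem.Set.contains p.2 kmer) = PySem.Set.contains p.2 kmer := by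
        simp [he]
      rw [hfp, hbeq]
      by_cases hm : kmer ∈ p.2
      · have hcnt : p.2.count kmer = 1 := List.count_eq_one_of_mem hp hm
        have hcon : PySem.Set.contains p.2 kmer = true := by
          simp [PySem.Set.contains, hm]
        rw [hcnt, hcon]
        simp only [if_true, if_false, Bool.false_eq_true]
        omega
      · have hcnt : p.2.count kmer = 0 := List.count_eq_zero_of_not_mem hm
        have hcon : PySem.Set.contains p.2 kmer = false := by
          simp [PySem.Set.contains, hm]
        rw [hcnt, hcon]
        simp only [if_false, Bool.false_eq_true]
        omega

-- cast bridge for the sum of counts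
theorem sum_cast (items : List (String × List String)) (kmer : String) :
    (items.map (fun p => ((p.2.count kmer : Nat) : Int))).sum
      = (((items.map (fun p => p.2.count kmer)).sum : Nat) : Int) := by
  induction items with
  | nil => simp
  | cons p t ih => simp [ih]

-- ===== VERDICT (by name: the statement is the Claim_ definition above) =====
theorem database2_build_spec : Claim_equal_database2_build := by
  intro db thr _
  simp only [Spec_database2_build, database2_build, database2_build_alt]
  have hNod := pvDictOf_values_nodup db
  set items := (pvDictOf db).items with hitems
  have htr :
      (items.foldl (fun tr fam =>
        fam.2.foldl (fun tr kmer =>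
          let count := items.foldl (fun c idx =>
            if (!(PySem.Set.equal idx.2 fam.2) && PySem.Set.contains idx.2 kmer) then c + 1 else c) (0 : Int)
          if thr ≤ count then PySem.Set.add tr kmer else tr) tr) PySem.Set.empty)
      = (items.foldl (fun tr s =>
          let eq := (items.foldl (fun e s =>
              e.insert (PySem.List.sorted s.2 (fun x => x) false)
                (e.getD (PySem.List.sorted s.2 (fun x => x) false) 0 + 1)) PySem.Dict.empty).getD
            (PySem.List.sorted s.2 (fun x => x) false) 0
          s.2.foldl (fun tr kmer =>
            if thr ≤ (items.foldl (fun t s => s.2.foldl (fun t k => t.insert k (t.getD k 0 + 1)) t)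
                PySem.Dict.empty).getD kmer 0 - eq then PySem.Set.add tr kmer else tr) tr) PySem.Set.empty) := by
    apply PySem.List.foldl_congr_mem
    intro tr fam hfam
    apply PySem.List.foldl_congr_mem
    intro tr' kmer hkm
    have hcount :
        (items.foldl (fun c idx =>
          if (!(PySem.Set.equal idx.2 fam.2) && PySem.Set.contains idx.2 kmer) then c + 1 else c) (0 : Int))
        = (items.foldl (fun t s => s.2.foldl (fun t k => t.insert k (t.getD k 0 + 1)) t)
              PySem.Dict.empty).getD kmer 0
          - (items.foldl (fun e s =>
              e.insert (PySem.List.sorted s.2 (fun x => x) false)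
                (e.getD (PySem.List.sorted s.2 (fun x => x) false) 0 + 1)) PySem.Dict.empty).getD
            (PySem.List.sorted fam.2 (fun x => x) false) 0 := by
      rw [PySem.List.foldl_if_add_one, total_getD, eqcount_getD]
      simp only [PySem.Dict.getD_empty, zero_add]
      have h := count_split fam.2 kmer (hNod fam hfam) hkm items hNod
      rw [sum_cast]
      omega
    simp only [hcount]
  rw [htr]
  apply List.map_congr_left
  intro p _
  rw [foldl_discard_eq_diff]
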